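-- pv_equiv track=rewrite | github.com/TessFerrandez/algorithms | gfg/w71/make-palindrome.py | makePalindrome1
-- ===== SOURCE A (Python) =====
-- from typing import List
-- from collections import Counter
--
-- def makePalindrome1(n: int, arr: List[str]) -> bool:
--     words = Counter(arr)
--
--     for word in arr:
--         if word not in words:
--             continue
--
--         reversed = word[::-1]
--         if reversed == word:
--             # current="aba" remove even copies
--             if words[word] % 2 == 0:
--                 del words[word]
--             else:
--                 words[word] = 1
--         else:
--             if reversed not in words:
--                 # current="abb" and "bba" is not in the list => return false
--                 return False
--             if words[reversed] != words[word]: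
--                 # current="abb" and "bba" is in the list - if they are the same count, remove them, else return false
--                 return False
--             del words[reversed]
--             del words[word]
--
--     if not words:
--         return True
--     if len(words) > 1:
--         return False
--
--     count = list(words.values())[0]
--     word = list(words.keys())[0]
--
--     if word == word[::-1] and count == 1:
--         return True
--
--     return False
-- ===== SOURCE B (Python) =====
-- from typing import List
-- from collections import Counter
--
--
-- def makePalindrome1(n: int, arr: List[str]) -> bool:
--     # One non-mutating pass over the unique words: every non-palindrome word's
--     # reverse must occur equally often, and at most one palindrome word may
--     # have an odd count.
--     counts = Counter(arr)
--     palindrome_odd = 0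
--     for word, c in counts.items():
--         rev = word[::-1]
--         if rev == word:
--             palindrome_odd += c % 2
--         elif counts.get(rev, 0) != c:
--             return False
--     return palindrome_odd <= 1
-- ===== Notes on version B (the rewrite author's own statement) =====
-- stated objective: simpler
-- what changed: Replaces A's mutate-and-delete scan over arr (deleting matched pairs from the Counter, then inspecting the leftover dict) with a single non-mutating pass over the Counter's unique items that checks reverse-counts and tallies odd-count palindromes.
import Mathlib
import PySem

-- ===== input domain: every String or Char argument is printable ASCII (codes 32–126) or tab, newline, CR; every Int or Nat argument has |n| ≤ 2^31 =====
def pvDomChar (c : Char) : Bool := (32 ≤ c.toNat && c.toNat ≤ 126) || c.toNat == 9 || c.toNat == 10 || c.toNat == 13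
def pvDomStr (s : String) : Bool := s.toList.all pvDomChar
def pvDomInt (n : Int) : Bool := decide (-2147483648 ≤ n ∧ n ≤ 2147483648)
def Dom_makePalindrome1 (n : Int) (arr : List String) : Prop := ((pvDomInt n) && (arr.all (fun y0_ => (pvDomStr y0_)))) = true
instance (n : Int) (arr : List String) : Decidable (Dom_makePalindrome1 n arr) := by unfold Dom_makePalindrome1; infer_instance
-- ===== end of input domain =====

-- B replaces A's mutate-and-delete scan over arr (which deletes matched pairs from the
-- Counter and inspects the leftover dict) with one non-mutating pass over the Counter's
-- unique items (objective: simpler); the return values agree on all inputs.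

-- word[::-1]; the step -1 is never 0, so slice? is always `some`
def pyRev (w : String) : String := (PySem.Str.slice? w none none (-1)).getD ""

-- ===== PORT A =====
def mkp1Loop (words : PySem.Dict String Int) : List String → Option (PySem.Dict String Int)
  | [] => some words
  | word :: rest =>
    if words.contains word = false then mkp1Loop words rest
    else
      let rev := pyRev word
      if rev = word then
        if PySem.Int.mod (words.getD word 0) 2 = 0 then
          mkp1Loop (words.erase word) rest
        else
          mkp1Loop (words.insert word 1) rest
      else
        if (words.contains rev) = false then none
        else if words.getD rev 0 ≠ words.getD word 0 then none
        else mkp1Loop ((words.erase rev).erase word) rest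


def makePalindrome1 (n : Int) (arr : List String) : Bool :=
  let words := PySem.Dict.counter arr
  match mkp1Loop words arr with
  | none => false
  | some words =>
    if words.size = 0 then true
    else if 1 < words.size then false
    else
      match words.items with
      | [] => false
      | (word, count) :: _ => decide (word = pyRev word) && decide (count = 1)


-- ===== PORT B =====
def mkp1AltLoop (counts : PySem.Dict String Int) : List (String × Int) → Int → Bool
  | [], palindromeOdd => decide (palindromeOdd ≤ 1)
  | (word, c) :: rest, palindromeOdd =>
    let rev := pyRev word
    if rev = word then mkp1AltLoop counts rest (palindromeOdd + PySem.Int.mod c 2)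
    else if counts.getD rev 0 ≠ c then false
    else mkp1AltLoop counts rest palindromeOdd


def makePalindrome1_alt (n : Int) (arr : List String) : Bool :=
  let counts := PySem.Dict.counter arr
  mkp1AltLoop counts counts.items 0


-- ===== PRECONDITION & SPEC =====
def Spec_makePalindrome1 (n : Int) (arr : List String) (out : Bool) : Prop := out = makePalindrome1_alt n arr
instance (n : Int) (arr : List String) (out : Bool) : Decidable (Spec_makePalindrome1 n arr out) := by unfold Spec_makePalindrome1; infer_instance

-- ===== CLAIM (what is proved, stated in full; the proofs are below) =====
def Claim_equal_makePalindrome1 : Prop := ∀ (n : Int) (arr : List String), Dom_makePalindrome1 n arr → Spec_makePalindrome1 n arr (makePalindrome1 n arr)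

-- ===== LEMMAS AND PROOFS =====

theorem pyRev_pyRev (w : String) : pyRev (pyRev w) = w := by
  simp [pyRev, PySem.Str.slice?_none_none_neg_one, String.toList_ofList]


-- the abstract state of A's loop: after the words of `p` have been processed,
-- the entry of the dict at a word w of the original counter is `gA arr p w`
def gA (arr p : List String) (w : String) : Option (String × Int) :=
  if pyRev w = w then
    (if w ∈ p then (if arr.count w % 2 = 1 then some (w, (1 : Int)) else none)
     else some (w, (arr.count w : Int)))
  else
    (if w ∈ p ∨ pyRev w ∈ p then none else some (w, (arr.count w : Int)))


theorem gA_key (arr p : List String) (w : String) (pr : String × Int)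
    (h : gA arr p w = some pr) : pr.1 = w := by
  unfold gA at h; split_ifs at h <;> simp [← Option.some_inj.mp h]


theorem gA_congr (arr p q : List String) (x : String)
    (h1 : x ∈ p ↔ x ∈ q) (h2 : pyRev x ∈ p ↔ pyRev x ∈ q) :
    gA arr p x = gA arr q x := by
  unfold gA; split_ifs <;> simp_all


-- `find?`/`get?`/`erase`/`insert` on a dict whose entries carry their own key
theorem find?_filterMap_keyed (L : List String) (f : String → Option (String × Int))
    (hf : ∀ x pr, f x = some pr → pr.1 = x) (hL : L.Nodup) (w : String) :
    (L.filterMap f).find? (fun p => p.1 == w) = if w ∈ L then f w else none := by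
  induction L with
  | nil => simp
  | cons x L ih =>
    simp only [List.nodup_cons] at hL
    rcases hx : f x with _ | pr
    · rw [List.filterMap_cons_none hx, ih hL.2]
      by_cases hwx : w = x
      · subst hwx; simp [hL.1, hx]
      · simp [List.mem_cons, hwx]
    · rw [List.filterMap_cons_some hx]
      have hk := hf x pr hx
      by_cases hxw : x = w
      · subst hxw
        simp [hk, hx]
      · rw [List.find?_cons_of_neg, ih hL.2]
        · simp [List.mem_cons, Ne.symm hxw]
        · simp [hk, hxw]


theorem get?_filterMap_keyed (L : List String) (f : String → Option (String × Int))
    (hf : ∀ x pr, f x = some pr → pr.1 = x) (hL : L.Nodup) (w : String) :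
    (PySem.Dict.mk (L.filterMap f)).get? w = (if w ∈ L then f w else none).map (·.2) := by
  show ((L.filterMap f).find? (fun p => p.1 == w)).map (·.2) = _
  rw [find?_filterMap_keyed L f hf hL w]


theorem erase_filterMap_keyed (L : List String) (f : String → Option (String × Int))
    (hf : ∀ x pr, f x = some pr → pr.1 = x) (w : String) :
    (PySem.Dict.mk (L.filterMap f)).erase w
      = PySem.Dict.mk (L.filterMap (fun x => if x = w then none else f x)) := by
  apply PySem.Dict.ext
  show (L.filterMap f).filter (fun p => !(p.1 == w)) = _
  induction L with
  | nil => simp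
  | cons x L ih =>
    rcases hx : f x with _ | pr
    · rw [List.filterMap_cons_none hx, ih]
      by_cases hxw : x = w <;> simp [List.filterMap_cons, hxw, hx]
    · have hk := hf x pr hx
      rw [List.filterMap_cons_some hx]
      by_cases hxw : x = w
      · subst hxw; simp [hk, List.filterMap_cons, ih]
      · simp [List.filter_cons, hk, hxw, List.filterMap_cons, hx, ih]


theorem insert_filterMap_keyed (L : List String) (f : String → Option (String × Int))
    (hf : ∀ x pr, f x = some pr → pr.1 = x) (hL : L.Nodup) (w : String) (v : Int)
    (hw : w ∈ L) (hsome : (f w).isSome) :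
    (PySem.Dict.mk (L.filterMap f)).insert w v
      = PySem.Dict.mk (L.filterMap (fun x => if x = w then some (w, v) else f x)) := by
  have hc : (PySem.Dict.mk (L.filterMap f)).contains w = true := by
    rw [PySem.Dict.contains_eq_isSome_get?, get?_filterMap_keyed L f hf hL w]
    simpa [hw, Option.isSome_map] using hsome
  unfold PySem.Dict.insert
  rw [hc]
  simp only [if_pos]
  congr 1
  have step : ∀ (M : List String),
      (M.filterMap f).map (fun p => if p.1 == w then (w, v) else p)
        = M.filterMap (fun x => if x = w then (f x).map (fun _ => (w, v)) else f x) := by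
    intro M
    induction M with
    | nil => simp
    | cons x M ih =>
      simp only [beq_iff_eq] at ih
      rw [List.filterMap_cons, List.filterMap_cons]
      by_cases hxw : x = w
      · subst hxw
        rcases hx : f x with _ | pr
        · simp [hx, ih]
        · have hk := hf x pr hx
          simp [hx, ih, hk]
      · rcases hx : f x with _ | pr
        · simp [hx, hxw, ih]
        · have hk := hf x pr hx
          simp [hx, hxw, ih, hk]
  show (L.filterMap f).map (fun p => if p.1 == w then (w, v) else p) = _
  rw [step L]
  apply List.filterMap_congr
  intro x hx
  by_cases hxw : x = w
  · subst hxw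
    rcases Option.isSome_iff_exists.mp hsome with ⟨pr, hpr⟩
    simp [hpr]
  · simp [hxw]

-- the loop invariant of A's scan
theorem mkp1Loop_invariant (arr : List String) : ∀ (rest p : List String),
    (∀ x ∈ rest, x ∈ arr) →
    (∀ x ∈ p, pyRev x ≠ x → arr.count (pyRev x) = arr.count x) →
    mkp1Loop (PySem.Dict.mk ((PySem.Set.ofList arr).filterMap (gA arr p))) rest
      = if ∀ x ∈ rest, pyRev x ≠ x → arr.count (pyRev x) = arr.count x
        then some (PySem.Dict.mk ((PySem.Set.ofList arr).filterMap (gA arr (p ++ rest))))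
        else none := by
  intro rest
  induction rest with
  | nil =>
    intro p _ _
    simp [mkp1Loop]
  | cons w rest ih =>
    intro p hrest hok
    have hwarr : w ∈ arr := hrest w (by simp)
    have hwU : w ∈ PySem.Set.ofList arr := (PySem.Set.mem_ofList arr w).mpr hwarr
    have hU : (PySem.Set.ofList arr).Nodup := PySem.Set.nodup_ofList arr
    have hkey : ∀ x pr, gA arr p x = some pr → pr.1 = x := gA_key arr p
    have hget : ∀ y, (PySem.Dict.mk ((PySem.Set.ofList arr).filterMap (gA arr p))).get? y
        = (if y ∈ PySem.Set.ofList arr then gA arr p y else none).map (·.2) :=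
      get?_filterMap_keyed _ _ hkey hU
    have hcont : ∀ y, (PySem.Dict.mk ((PySem.Set.ofList arr).filterMap (gA arr p))).contains y
        = ((if y ∈ PySem.Set.ofList arr then gA arr p y else none).map (·.2)).isSome := by
      intro y; rw [PySem.Dict.contains_eq_isSome_get?, hget y]
    have happ : p ++ w :: rest = (p ++ [w]) ++ rest := List.append_cons p w rest
    have hrest' : ∀ x ∈ rest, x ∈ arr := fun x hx => hrest x (List.mem_cons_of_mem w hx)
    have hmod : PySem.Int.mod (arr.count w : Int) 2 = ((arr.count w % 2 : Nat) : Int) := by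
      exact_mod_cast PySem.Int.mod_natCast (arr.count w) 2
    rw [mkp1Loop, happ]
    by_cases hpal : pyRev w = w
    · -- palindrome word
      have hcondiff : (∀ x ∈ w :: rest, pyRev x ≠ x → arr.count (pyRev x) = arr.count x)
          ↔ (∀ x ∈ rest, pyRev x ≠ x → arr.count (pyRev x) = arr.count x) := by
        simp only [List.forall_mem_cons, hpal, ne_eq, not_true_eq_false, false_implies, true_and]
      have hok' : ∀ x ∈ p ++ [w], pyRev x ≠ x → arr.count (pyRev x) = arr.count x := by
        intro x hx
        rcases List.mem_append.mp hx with h | h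
        · exact hok x h
        · simp only [List.mem_singleton] at h
          rw [h, hpal]
          intro hc; exact absurd rfl hc
      have hcongr_other : ∀ x, x ≠ w → gA arr p x = gA arr (p ++ [w]) x := by
        intro x hxw
        apply gA_congr
        · simp [List.mem_append, hxw]
        · have hrx : pyRev x ≠ w := by
            intro hc
            exact hxw (by rw [← pyRev_pyRev x, hc, hpal])
          simp [List.mem_append, hrx]
      by_cases hwp : w ∈ p
      · by_cases hodd : arr.count w % 2 = 1
        · -- entry is (w, 1); insert w 1 keeps everything
          have hval : gA arr p w = some (w, 1) := by simp [gA, hpal, hwp, hodd]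
          have hcw : (PySem.Dict.mk ((PySem.Set.ofList arr).filterMap (gA arr p))).contains w = true := by
            rw [hcont w, if_pos hwU, hval]; rfl
          rw [hcw, if_neg (by simp)]
          simp only []
          rw [if_pos hpal]
          have hgd : (PySem.Dict.mk ((PySem.Set.ofList arr).filterMap (gA arr p))).getD w 0 = 1 := by
            simp [PySem.Dict.getD, hget w, hwU, hval]
          rw [hgd, if_neg (by decide)]
          rw [insert_filterMap_keyed _ _ hkey hU w 1 hwU (by rw [hval]; rfl)]
          have hstep : (PySem.Set.ofList arr).filterMap (fun x => if x = w then some (w, 1) else gA arr p x)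
              = (PySem.Set.ofList arr).filterMap (gA arr (p ++ [w])) := by
            apply List.filterMap_congr
            intro x hx
            by_cases hxw : x = w
            · rw [if_pos hxw, hxw,
                show gA arr (p ++ [w]) w = some (w, 1) by simp [gA, hpal, hodd]]
            · rw [if_neg hxw, hcongr_other x hxw]
          rw [hstep, ih (p ++ [w]) hrest' hok', if_congr hcondiff rfl rfl]
        · -- entry for w absent: skip
          have hval : gA arr p w = none := by simp [gA, hpal, hwp, hodd]
          have hcw : (PySem.Dict.mk ((PySem.Set.ofList arr).filterMap (gA arr p))).contains w = false := by
            rw [hcont w, if_pos hwU, hval]; rfl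
          rw [hcw, if_pos rfl]
          have hstep : (PySem.Set.ofList arr).filterMap (gA arr p)
              = (PySem.Set.ofList arr).filterMap (gA arr (p ++ [w])) := by
            apply List.filterMap_congr
            intro x hx
            by_cases hxw : x = w
            · rw [hxw, hval, show gA arr (p ++ [w]) w = none by simp [gA, hpal, hodd]]
            · exact hcongr_other x hxw
          rw [hstep, ih (p ++ [w]) hrest' hok', if_congr hcondiff rfl rfl]
      · -- w unseen: entry (w, count w)
        have hval : gA arr p w = some (w, (arr.count w : Int)) := by simp [gA, hpal, hwp]
        have hcw : (PySem.Dict.mk ((PySem.Set.ofList arr).filterMap (gA arr p))).contains w = true := by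
          rw [hcont w, if_pos hwU, hval]; rfl
        rw [hcw, if_neg (by simp)]
        simp only []
        rw [if_pos hpal]
        have hgd : (PySem.Dict.mk ((PySem.Set.ofList arr).filterMap (gA arr p))).getD w 0 = (arr.count w : Int) := by
          simp [PySem.Dict.getD, hget w, hwU, hval]
        rw [hgd, hmod]
        by_cases heven : arr.count w % 2 = 0
        · rw [if_pos (by exact_mod_cast congrArg (Nat.cast : Nat → Int) heven)]
          rw [erase_filterMap_keyed _ _ hkey w]
          have hstep : (PySem.Set.ofList arr).filterMap (fun x => if x = w then none else gA arr p x)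
              = (PySem.Set.ofList arr).filterMap (gA arr (p ++ [w])) := by
            apply List.filterMap_congr
            intro x hx
            by_cases hxw : x = w
            · rw [if_pos hxw, hxw,
                show gA arr (p ++ [w]) w = none by simp [gA, hpal, Nat.mod_two_ne_one.mpr heven]]
            · rw [if_neg hxw, hcongr_other x hxw]
          rw [hstep, ih (p ++ [w]) hrest' hok', if_congr hcondiff rfl rfl]
        · have hodd : arr.count w % 2 = 1 := Nat.mod_two_ne_zero.mp heven
          rw [if_neg (by exact_mod_cast heven)]
          rw [insert_filterMap_keyed _ _ hkey hU w 1 hwU (by rw [hval]; rfl)]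
          have hstep : (PySem.Set.ofList arr).filterMap (fun x => if x = w then some (w, 1) else gA arr p x)
              = (PySem.Set.ofList arr).filterMap (gA arr (p ++ [w])) := by
            apply List.filterMap_congr
            intro x hx
            by_cases hxw : x = w
            · rw [if_pos hxw, hxw,
                show gA arr (p ++ [w]) w = some (w, 1) by simp [gA, hpal, hodd]]
            · rw [if_neg hxw, hcongr_other x hxw]
          rw [hstep, ih (p ++ [w]) hrest' hok', if_congr hcondiff rfl rfl]
    · -- non-palindrome word
      have hrevrev : pyRev (pyRev w) = w := pyRev_pyRev w
      have hrevnp : pyRev (pyRev w) ≠ pyRev w := by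
        rw [hrevrev]; intro hc; exact hpal hc.symm
      have hcongr_other : ∀ x, x ≠ w → x ≠ pyRev w → gA arr p x = gA arr (p ++ [w]) x := by
        intro x hxw hxr
        apply gA_congr
        · simp [List.mem_append, hxw]
        · have hrx : pyRev x ≠ w := by
            intro hc
            exact hxr (by rw [← pyRev_pyRev x, hc])
          simp [List.mem_append, hrx]
      by_cases hres : w ∈ p ∨ pyRev w ∈ p
      · -- already resolved: skip
        have hpass : arr.count (pyRev w) = arr.count w := by
          rcases hres with h | h
          · exact hok w h hpal
          · have := hok (pyRev w) h hrevnp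
            rw [hrevrev] at this
            exact this.symm
        have hval : gA arr p w = none := by simp [gA, hpal, hres]
        have hcw : (PySem.Dict.mk ((PySem.Set.ofList arr).filterMap (gA arr p))).contains w = false := by
          rw [hcont w, if_pos hwU, hval]; rfl
        rw [hcw, if_pos rfl]
        have hcondiff : (∀ x ∈ w :: rest, pyRev x ≠ x → arr.count (pyRev x) = arr.count x)
            ↔ (∀ x ∈ rest, pyRev x ≠ x → arr.count (pyRev x) = arr.count x) := by
          simp only [List.forall_mem_cons]
          constructor
          · exact fun h => h.2
          · exact fun h => ⟨fun _ => hpass, h⟩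
        have hok' : ∀ x ∈ p ++ [w], pyRev x ≠ x → arr.count (pyRev x) = arr.count x := by
          intro x hx
          rcases List.mem_append.mp hx with h | h
          · exact hok x h
          · simp only [List.mem_singleton] at h
            rw [h]; exact fun _ => hpass
        have hstep : (PySem.Set.ofList arr).filterMap (gA arr p)
            = (PySem.Set.ofList arr).filterMap (gA arr (p ++ [w])) := by
          apply List.filterMap_congr
          intro x hx
          by_cases hxw : x = w
          · rw [hxw, hval, show gA arr (p ++ [w]) w = none by
              unfold gA
              rw [if_neg hpal, if_pos (Or.inl (List.mem_append.mpr (Or.inr (by simp))))]]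
          · by_cases hxr : x = pyRev w
            · rw [hxr,
                show gA arr p (pyRev w) = none by
                  unfold gA
                  rw [if_neg hrevnp, if_pos (by rw [hrevrev]; exact hres.symm)],
                show gA arr (p ++ [w]) (pyRev w) = none by
                  unfold gA
                  rw [if_neg hrevnp,
                    if_pos (Or.inr (by rw [hrevrev]; exact List.mem_append.mpr (Or.inr (by simp))))]]
            · exact hcongr_other x hxw hxr
        rw [hstep, ih (p ++ [w]) hrest' hok', if_congr hcondiff rfl rfl]
      · push_neg at hres
        have hval : gA arr p w = some (w, (arr.count w : Int)) := by
          simp [gA, hpal, hres.1, hres.2]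
        have hcw : (PySem.Dict.mk ((PySem.Set.ofList arr).filterMap (gA arr p))).contains w = true := by
          rw [hcont w, if_pos hwU, hval]; rfl
        rw [hcw, if_neg (by simp)]
        simp only []
        rw [if_neg hpal]
        by_cases hrevarr : pyRev w ∈ arr
        · have hrevU : pyRev w ∈ PySem.Set.ofList arr := (PySem.Set.mem_ofList arr _).mpr hrevarr
          have hrval : gA arr p (pyRev w) = some (pyRev w, (arr.count (pyRev w) : Int)) := by
            simp [gA, hrevnp, hrevrev, hres.1, hres.2]
          have hcr : (PySem.Dict.mk ((PySem.Set.ofList arr).filterMap (gA arr p))).contains (pyRev w) = true := by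
            rw [hcont _, if_pos hrevU, hrval]; rfl
          rw [hcr, if_neg (by simp)]
          have hgdw : (PySem.Dict.mk ((PySem.Set.ofList arr).filterMap (gA arr p))).getD w 0 = (arr.count w : Int) := by
            simp [PySem.Dict.getD, hget w, hwU, hval]
          have hgdr : (PySem.Dict.mk ((PySem.Set.ofList arr).filterMap (gA arr p))).getD (pyRev w) 0 = (arr.count (pyRev w) : Int) := by
            simp [PySem.Dict.getD, hget _, hrevU, hrval]
          rw [hgdw, hgdr]
          by_cases hcnt : arr.count (pyRev w) = arr.count w
          · rw [if_neg (by simp [hcnt])]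
            rw [erase_filterMap_keyed _ _ hkey (pyRev w)]
            have hkey2 : ∀ x pr, (if x = pyRev w then none else gA arr p x) = some pr → pr.1 = x := by
              intro x pr h
              by_cases hx : x = pyRev w
              · rw [if_pos hx] at h; cases h
              · rw [if_neg hx] at h; exact hkey x pr h
            rw [erase_filterMap_keyed _ _ hkey2 w]
            have hok' : ∀ x ∈ p ++ [w], pyRev x ≠ x → arr.count (pyRev x) = arr.count x := by
              intro x hx
              rcases List.mem_append.mp hx with h | h
              · exact hok x h
              · simp only [List.mem_singleton] at h
                rw [h]; exact fun _ => hcnt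
            have hcondiff : (∀ x ∈ w :: rest, pyRev x ≠ x → arr.count (pyRev x) = arr.count x)
                ↔ (∀ x ∈ rest, pyRev x ≠ x → arr.count (pyRev x) = arr.count x) := by
              simp only [List.forall_mem_cons]
              constructor
              · exact fun h => h.2
              · exact fun h => ⟨fun _ => hcnt, h⟩
            have hstep : (PySem.Set.ofList arr).filterMap
                  (fun x => if x = w then none else if x = pyRev w then none else gA arr p x)
                = (PySem.Set.ofList arr).filterMap (gA arr (p ++ [w])) := by
              apply List.filterMap_congr
              intro x hx
              by_cases hxw : x = w
              · rw [if_pos hxw, hxw, show gA arr (p ++ [w]) w = none by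
                  unfold gA
                  rw [if_neg hpal, if_pos (Or.inl (List.mem_append.mpr (Or.inr (by simp))))]]
              · rw [if_neg hxw]
                by_cases hxr : x = pyRev w
                · rw [if_pos hxr, hxr, show gA arr (p ++ [w]) (pyRev w) = none by
                    unfold gA
                    rw [if_neg hrevnp,
                      if_pos (Or.inr (by rw [hrevrev]; exact List.mem_append.mpr (Or.inr (by simp))))]]
                · rw [if_neg hxr]
                  exact hcongr_other x hxw hxr
            rw [hstep, ih (p ++ [w]) hrest' hok', if_congr hcondiff rfl rfl]
          · rw [if_pos (show ¬((arr.count (pyRev w) : Int) = (arr.count w : Int)) by exact_mod_cast hcnt)]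
            rw [if_neg (by
              intro h
              exact hcnt (h w (by simp) hpal))]
        · -- reverse not in arr: contains rev = false, return False; count rev = 0 ≠ count w
          have hrevU : pyRev w ∉ PySem.Set.ofList arr := fun hc => hrevarr ((PySem.Set.mem_ofList arr _).mp hc)
          have hcr : (PySem.Dict.mk ((PySem.Set.ofList arr).filterMap (gA arr p))).contains (pyRev w) = false := by
            rw [hcont _, if_neg hrevU]; rfl
          rw [hcr, if_pos rfl]
          rw [if_neg (by
            intro h
            have h2 := h w (by simp) hpal
            rw [List.count_eq_zero_of_not_mem hrevarr] at h2
            have h3 := List.count_pos_iff.mpr hwarr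
            omega)]

theorem counter_eq_filterMap (arr : List String) :
    PySem.Dict.counter arr
      = PySem.Dict.mk ((PySem.Set.ofList arr).filterMap (gA arr [])) := by
  apply PySem.Dict.ext
  rw [PySem.Dict.items_counter]
  show _ = (PySem.Set.ofList arr).filterMap (gA arr [])
  rw [List.filterMap_congr (g := fun k => some (k, (arr.count k : Int)))
    (fun x _ => by simp [gA])]
  rw [show (fun k => some (k, ((List.count k arr : Nat) : Int))) = some ∘ (fun k => (k, ((List.count k arr : Nat) : Int))) from rfl,
    List.filterMap_eq_map]


theorem filterMap_gA_full (arr : List String) (L : List String) (hL : ∀ x ∈ L, x ∈ arr) :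
    L.filterMap (gA arr ([] ++ arr))
      = (L.filter (fun w => decide (pyRev w = w) && decide (arr.count w % 2 = 1))).map
          (fun w => (w, (1 : Int))) := by
  induction L with
  | nil => simp
  | cons x L ih =>
    have hx : x ∈ arr := hL x (by simp)
    have ih' := ih (fun y hy => hL y (List.mem_cons_of_mem x hy))
    rw [List.filterMap_cons, List.filter_cons]
    by_cases hp : pyRev x = x
    · have hg : gA arr ([] ++ arr) x
          = if arr.count x % 2 = 1 then some (x, (1 : Int)) else none := by
        unfold gA
        rw [if_pos hp, if_pos (by simpa using hx)]
      by_cases ho : arr.count x % 2 = 1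
      · rw [hg, if_pos ho, ih']
        simp [hp, ho]
      · rw [hg, if_neg ho, ih']
        simp [hp, ho]
    · have hg : gA arr ([] ++ arr) x = none := by
        unfold gA
        rw [if_neg hp, if_pos (Or.inl (by simpa using hx))]
      rw [hg, ih']
      simp [hp]


theorem mkp1AltLoop_eq (arr : List String) (L : List String) (odd : Int) :
    mkp1AltLoop (PySem.Dict.counter arr) (L.map (fun k => (k, (arr.count k : Int)))) odd
      = (decide (∀ x ∈ L, pyRev x ≠ x → arr.count (pyRev x) = arr.count x)
         && decide (odd + ((L.filter (fun w => decide (pyRev w = w) && decide (arr.count w % 2 = 1))).length : Int) ≤ 1)) := by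
  induction L generalizing odd with
  | nil => simp [mkp1AltLoop]
  | cons x L ih =>
    rw [List.map_cons, mkp1AltLoop]
    have hmod : PySem.Int.mod (arr.count x : Int) 2 = ((arr.count x % 2 : Nat) : Int) := by
      exact_mod_cast PySem.Int.mod_natCast (arr.count x) 2
    by_cases hp : pyRev x = x
    · have h1 : (∀ y ∈ x :: L, pyRev y ≠ y → arr.count (pyRev y) = arr.count y)
          ↔ (∀ y ∈ L, pyRev y ≠ y → arr.count (pyRev y) = arr.count y) := by
        simp [List.forall_mem_cons, hp]
      rw [if_pos hp, hmod, ih, decide_eq_decide.mpr h1, List.filter_cons]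
      by_cases ho : arr.count x % 2 = 1
      · rw [if_pos (by simp [hp, ho]), ho, List.length_cons]
        congr 1
        apply decide_eq_decide.mpr
        push_cast
        omega
      · have ho0 : arr.count x % 2 = 0 := Nat.mod_two_ne_one.mp ho
        rw [if_neg (by simp [ho]), ho0]
        congr 1
        apply decide_eq_decide.mpr
        push_cast
        omega
    · rw [if_neg hp, PySem.Dict.getD_counter]
      by_cases hc : arr.count (pyRev x) = arr.count x
      · have h1 : (∀ y ∈ x :: L, pyRev y ≠ y → arr.count (pyRev y) = arr.count y)
            ↔ (∀ y ∈ L, pyRev y ≠ y → arr.count (pyRev y) = arr.count y) := by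
          simp only [List.forall_mem_cons]
          exact ⟨fun h => h.2, fun h => ⟨fun _ => hc, h⟩⟩
        rw [if_neg (by exact_mod_cast not_not_intro hc), ih, decide_eq_decide.mpr h1,
          List.filter_cons, if_neg (by simp [hp])]
      · rw [if_pos (by exact_mod_cast hc)]
        have hnot : ¬(∀ y ∈ x :: L, pyRev y ≠ y → arr.count (pyRev y) = arr.count y) := by
          intro h; exact hc (h x (by simp) hp)
        rw [decide_eq_false hnot, Bool.false_and]


-- closed forms of the two ports
theorem makePalindrome1_eq (n : Int) (arr : List String) :
    makePalindrome1 n arr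
      = (decide (∀ x ∈ arr, pyRev x ≠ x → arr.count (pyRev x) = arr.count x)
         && decide (((PySem.Set.ofList arr).filter
              (fun w => decide (pyRev w = w) && decide (arr.count w % 2 = 1))).length ≤ 1)) := by
  unfold makePalindrome1
  simp only []
  rw [counter_eq_filterMap arr,
    mkp1Loop_invariant arr arr [] (fun x hx => hx) (by simp)]
  by_cases hP : ∀ x ∈ arr, pyRev x ≠ x → arr.count (pyRev x) = arr.count x
  · rw [if_pos hP]
    rw [show ((PySem.Set.ofList arr).filterMap (gA arr ([] ++ arr)))
        = ((PySem.Set.ofList arr).filter (fun w => decide (pyRev w = w) && decide (arr.count w % 2 = 1))).map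
            (fun w => (w, (1 : Int))) from
      filterMap_gA_full arr _ (fun x hx => (PySem.Set.mem_ofList arr x).mp hx)]
    simp only [decide_eq_true hP, Bool.true_and]
    rcases hF : (PySem.Set.ofList arr).filter (fun w => decide (pyRev w = w) && decide (arr.count w % 2 = 1)) with _ | ⟨a, tl⟩
    · simp [PySem.Dict.size]
    · rcases tl with _ | ⟨b, tl'⟩
      · have hpa : pyRev a = a := by
          have : a ∈ (PySem.Set.ofList arr).filter (fun w => decide (pyRev w = w) && decide (arr.count w % 2 = 1)) := by
            rw [hF]; simp
          have hb := List.of_mem_filter this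
          simp only [Bool.and_eq_true, decide_eq_true_eq] at hb
          exact hb.1
        simp [PySem.Dict.size, hpa]
      · simp [PySem.Dict.size]
  · rw [if_neg hP]
    simp [hP]


theorem makePalindrome1_alt_eq (n : Int) (arr : List String) :
    makePalindrome1_alt n arr
      = (decide (∀ x ∈ arr, pyRev x ≠ x → arr.count (pyRev x) = arr.count x)
         && decide (((PySem.Set.ofList arr).filter
              (fun w => decide (pyRev w = w) && decide (arr.count w % 2 = 1))).length ≤ 1)) := by
  unfold makePalindrome1_alt
  simp only []
  rw [PySem.Dict.items_counter, mkp1AltLoop_eq arr _ 0]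
  congr 1
  · exact decide_eq_decide.mpr (by
      constructor
      · intro h x hx
        exact h x ((PySem.Set.mem_ofList arr x).mpr hx)
      · intro h x hx
        exact h x ((PySem.Set.mem_ofList arr x).mp hx))
  · exact decide_eq_decide.mpr (by omega)

-- ===== VERDICT (by name: the statement is the Claim_ definition above) =====
theorem makePalindrome1_spec : Claim_equal_makePalindrome1 := by
  intro n arr _
  unfold Spec_makePalindrome1
  rw [makePalindrome1_eq, makePalindrome1_alt_eq]
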